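-- pv_equiv track=rewrite | github.com/alphacentaury-github/NPSS2020 | Jimin_works/WeatherApp/문해알 최종/WeatherApp/get_weather.py | nearest_base_time
-- ===== SOURCE A (Python) =====
-- def nearest_base_time(now_time):
--     """
--     기상청 단기 예보는 정해진 base time에 이루어 지므로,
--     현재 시간에 가장 가까운 base time을 찾는다.
--     """
--     base_time_list = ['0200', '0500', '0800', '1100', '1400', '1700', '2000', '2300']
--     best = '2300'
--     for bb in base_time_list:
--         if bb > now_time :
--             break
--         else:
--             best = bb
--     return best
-- ===== SOURCE B (Python) =====
-- def nearest_base_time(now_time):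
--     """Binary search (bisect_right by hand) for the last base time <= now_time.
--
--     When now_time precedes '0200' the insertion point is 0, so index -1
--     naturally picks the last entry '2300' (yesterday's final base time).
--     """
--     base_time_list = ['0200', '0500', '0800', '1100', '1400', '1700', '2000', '2300']
--     lo, hi = 0, len(base_time_list)
--     while lo < hi:
--         mid = (lo + hi) // 2
--         if base_time_list[mid] <= now_time:
--             lo = mid + 1
--         else:
--             hi = mid
--     return base_time_list[lo - 1]
-- ===== Notes on version B (the rewrite author's own statement) =====
-- stated objective: alternative
-- what changed: A's forward scan with a break and a '2300' sentinel is replaced by a hand-written bisect_right binary search over the sorted base-time list, returning base_time_list[lo - 1] where Python's index -1 wraps to '2300'.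
import Mathlib
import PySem

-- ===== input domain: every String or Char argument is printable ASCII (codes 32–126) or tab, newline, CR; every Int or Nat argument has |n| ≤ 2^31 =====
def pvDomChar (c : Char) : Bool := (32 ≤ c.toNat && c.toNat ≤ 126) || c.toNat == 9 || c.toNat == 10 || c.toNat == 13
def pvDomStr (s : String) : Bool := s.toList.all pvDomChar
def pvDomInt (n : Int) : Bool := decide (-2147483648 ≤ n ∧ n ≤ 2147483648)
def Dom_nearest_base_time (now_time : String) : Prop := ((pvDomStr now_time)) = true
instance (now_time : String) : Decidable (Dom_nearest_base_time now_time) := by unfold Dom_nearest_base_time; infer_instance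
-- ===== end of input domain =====

-- B replaces A's linear break-scan (sentinel '2300') by a hand-written bisect_right binary
-- search whose index -1 (Python negative indexing) wraps to '2300'; same return value
-- everywhere, alternative structure (the list has only 8 entries, so no speed claim).

-- ===== PORT A =====
-- Python string comparison is code-point lexicographic = '<' on .toList (PySem doc);
-- the for-loop with break is a foldl over the (broken, best) pair.
def nearest_base_time (now_time : String) : String :=
  let base_time_list : List String := ["0200", "0500", "0800", "1100", "1400", "1700", "2000", "2300"]
  let r := base_time_list.foldl
    (fun (st : Bool × String) bb =>
      if st.1 then st
      else if now_time.toList < bb.toList then (true, st.2)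
      else (false, bb))
    (false, "2300")
  r.2

-- ===== PORT B =====
-- the `while lo < hi` loop of Source B, with fuel = the list length (≥ the iteration count);
-- the index mid always satisfies 0 ≤ lo ≤ mid < hi ≤ len, so pyGetD is exact here.
def bisectLoop (base : List String) (now : String) : Nat → Int → Int → Int
  | 0, lo, _ => lo
  | fuel+1, lo, hi =>
    if lo < hi then
      let mid := PySem.Int.floordiv (lo + hi) 2
      if (PySem.List.pyGetD base mid "").toList ≤ now.toList then
        bisectLoop base now fuel (mid+1) hi
      else
        bisectLoop base now fuel lo mid
    else lo

def nearest_base_time_alt (now_time : String) : String :=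
  let base_time_list : List String := ["0200", "0500", "0800", "1100", "1400", "1700", "2000", "2300"]
  let lo := bisectLoop base_time_list now_time base_time_list.length 0 (base_time_list.length : Int)
  -- base_time_list[lo - 1]: lo - 1 ∈ [-1, 7], so Python's negative indexing never raises
  ((PySem.List.pyGet? base_time_list (lo - 1)).getD "")

-- ===== PRECONDITION & SPEC =====
def Spec_nearest_base_time (now_time : String) (out : String) : Prop := out = nearest_base_time_alt now_time
instance (now_time : String) (out : String) : Decidable (Spec_nearest_base_time now_time out) := by unfold Spec_nearest_base_time; infer_instance

-- ===== CLAIM (what is proved, stated in full; the proofs are below) =====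
def Claim_equal_nearest_base_time : Prop := ∀ (now_time : String), Dom_nearest_base_time now_time → Spec_nearest_base_time now_time (nearest_base_time now_time)

-- ===== LEMMAS AND PROOFS =====

theorem bl8 (s : String) (lo hi : Int) : bisectLoop ["0200", "0500", "0800", "1100", "1400", "1700", "2000", "2300"] s 8 lo hi = if lo < hi then (if (PySem.List.pyGetD ["0200", "0500", "0800", "1100", "1400", "1700", "2000", "2300"] (PySem.Int.floordiv (lo + hi) 2) "").toList ≤ s.toList then bisectLoop ["0200", "0500", "0800", "1100", "1400", "1700", "2000", "2300"] s 7 (PySem.Int.floordiv (lo + hi) 2 + 1) hi else bisectLoop ["0200", "0500", "0800", "1100", "1400", "1700", "2000", "2300"] s 7 lo (PySem.Int.floordiv (lo + hi) 2)) else lo := rfl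
theorem bl7 (s : String) (lo hi : Int) : bisectLoop ["0200", "0500", "0800", "1100", "1400", "1700", "2000", "2300"] s 7 lo hi = if lo < hi then (if (PySem.List.pyGetD ["0200", "0500", "0800", "1100", "1400", "1700", "2000", "2300"] (PySem.Int.floordiv (lo + hi) 2) "").toList ≤ s.toList then bisectLoop ["0200", "0500", "0800", "1100", "1400", "1700", "2000", "2300"] s 6 (PySem.Int.floordiv (lo + hi) 2 + 1) hi else bisectLoop ["0200", "0500", "0800", "1100", "1400", "1700", "2000", "2300"] s 6 lo (PySem.Int.floordiv (lo + hi) 2)) else lo := rfl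
theorem bl6 (s : String) (lo hi : Int) : bisectLoop ["0200", "0500", "0800", "1100", "1400", "1700", "2000", "2300"] s 6 lo hi = if lo < hi then (if (PySem.List.pyGetD ["0200", "0500", "0800", "1100", "1400", "1700", "2000", "2300"] (PySem.Int.floordiv (lo + hi) 2) "").toList ≤ s.toList then bisectLoop ["0200", "0500", "0800", "1100", "1400", "1700", "2000", "2300"] s 5 (PySem.Int.floordiv (lo + hi) 2 + 1) hi else bisectLoop ["0200", "0500", "0800", "1100", "1400", "1700", "2000", "2300"] s 5 lo (PySem.Int.floordiv (lo + hi) 2)) else lo := rfl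
theorem bl5 (s : String) (lo hi : Int) : bisectLoop ["0200", "0500", "0800", "1100", "1400", "1700", "2000", "2300"] s 5 lo hi = if lo < hi then (if (PySem.List.pyGetD ["0200", "0500", "0800", "1100", "1400", "1700", "2000", "2300"] (PySem.Int.floordiv (lo + hi) 2) "").toList ≤ s.toList then bisectLoop ["0200", "0500", "0800", "1100", "1400", "1700", "2000", "2300"] s 4 (PySem.Int.floordiv (lo + hi) 2 + 1) hi else bisectLoop ["0200", "0500", "0800", "1100", "1400", "1700", "2000", "2300"] s 4 lo (PySem.Int.floordiv (lo + hi) 2)) else lo := rfl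
theorem bl_id (s : String) (f : Nat) (lo : Int) : bisectLoop ["0200", "0500", "0800", "1100", "1400", "1700", "2000", "2300"] s f lo lo = lo := by cases f <;> simp [bisectLoop]
theorem gd1 : PySem.List.pyGetD ["0200", "0500", "0800", "1100", "1400", "1700", "2000", "2300"] 1 "" = "0500" := by decide
theorem gd2 : PySem.List.pyGetD ["0200", "0500", "0800", "1100", "1400", "1700", "2000", "2300"] 2 "" = "0800" := by decide
theorem gd3 : PySem.List.pyGetD ["0200", "0500", "0800", "1100", "1400", "1700", "2000", "2300"] 3 "" = "1100" := by decide
theorem gd4 : PySem.List.pyGetD ["0200", "0500", "0800", "1100", "1400", "1700", "2000", "2300"] 4 "" = "1400" := by decide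
theorem gd5 : PySem.List.pyGetD ["0200", "0500", "0800", "1100", "1400", "1700", "2000", "2300"] 5 "" = "1700" := by decide
theorem gd6 : PySem.List.pyGetD ["0200", "0500", "0800", "1100", "1400", "1700", "2000", "2300"] 6 "" = "2000" := by decide
theorem gd7 : PySem.List.pyGetD ["0200", "0500", "0800", "1100", "1400", "1700", "2000", "2300"] 7 "" = "2300" := by decide
theorem gq_neg : (PySem.List.pyGet? ["0200", "0500", "0800", "1100", "1400", "1700", "2000", "2300"] (-1)).getD "" = "2300" := by decide

theorem nbt_eq (s : String) : nearest_base_time s = nearest_base_time_alt s := by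
  by_cases h0 : ['0', '2', '0', '0'] ≤ s.toList
  · by_cases h1 : ['0', '5', '0', '0'] ≤ s.toList
    · by_cases h2 : ['0', '8', '0', '0'] ≤ s.toList
      · by_cases h3 : ['1', '1', '0', '0'] ≤ s.toList
        · by_cases h4 : ['1', '4', '0', '0'] ≤ s.toList
          · by_cases h5 : ['1', '7', '0', '0'] ≤ s.toList
            · by_cases h6 : ['2', '0', '0', '0'] ≤ s.toList
              · by_cases h7 : ['2', '3', '0', '0'] ≤ s.toList
                · have a0 : ¬ s.toList < ['0', '2', '0', '0'] := not_lt.mpr h0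
                  have a1 : ¬ s.toList < ['0', '5', '0', '0'] := not_lt.mpr h1
                  have a2 : ¬ s.toList < ['0', '8', '0', '0'] := not_lt.mpr h2
                  have a3 : ¬ s.toList < ['1', '1', '0', '0'] := not_lt.mpr h3
                  have a4 : ¬ s.toList < ['1', '4', '0', '0'] := not_lt.mpr h4
                  have a5 : ¬ s.toList < ['1', '7', '0', '0'] := not_lt.mpr h5
                  have a6 : ¬ s.toList < ['2', '0', '0', '0'] := not_lt.mpr h6
                  have a7 : ¬ s.toList < ['2', '3', '0', '0'] := not_lt.mpr h7
                  simp [nearest_base_time, nearest_base_time_alt, List.foldl, bl8, bl7, bl6, bl_id, gd4, gd6, gd7, a0, a1, a2, a3, h4, a4, a5, h6, a6, h7, a7]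
                · have a0 : ¬ s.toList < ['0', '2', '0', '0'] := not_lt.mpr h0
                  have a1 : ¬ s.toList < ['0', '5', '0', '0'] := not_lt.mpr h1
                  have a2 : ¬ s.toList < ['0', '8', '0', '0'] := not_lt.mpr h2
                  have a3 : ¬ s.toList < ['1', '1', '0', '0'] := not_lt.mpr h3
                  have a4 : ¬ s.toList < ['1', '4', '0', '0'] := not_lt.mpr h4
                  have a5 : ¬ s.toList < ['1', '7', '0', '0'] := not_lt.mpr h5
                  have a6 : ¬ s.toList < ['2', '0', '0', '0'] := not_lt.mpr h6
                  have b7 : s.toList < ['2', '3', '0', '0'] := not_le.mp h7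
                  simp [nearest_base_time, nearest_base_time_alt, List.foldl, bl8, bl7, bl6, bl_id, gd4, gd6, gd7, a0, a1, a2, a3, h4, a4, a5, h6, a6, h7, b7]
              · have a0 : ¬ s.toList < ['0', '2', '0', '0'] := not_lt.mpr h0
                have a1 : ¬ s.toList < ['0', '5', '0', '0'] := not_lt.mpr h1
                have a2 : ¬ s.toList < ['0', '8', '0', '0'] := not_lt.mpr h2
                have a3 : ¬ s.toList < ['1', '1', '0', '0'] := not_lt.mpr h3
                have a4 : ¬ s.toList < ['1', '4', '0', '0'] := not_lt.mpr h4
                have a5 : ¬ s.toList < ['1', '7', '0', '0'] := not_lt.mpr h5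
                have b6 : s.toList < ['2', '0', '0', '0'] := not_le.mp h6
                have n7 : ¬ ['2', '3', '0', '0'] ≤ s.toList := fun hx => h6 (le_trans (by decide) hx)
                have b7 : s.toList < ['2', '3', '0', '0'] := lt_trans b6 (by decide)
                simp [nearest_base_time, nearest_base_time_alt, List.foldl, bl8, bl7, bl6, bl_id, gd4, gd5, gd6, a0, a1, a2, a3, h4, a4, h5, a5, h6, b6]
            · have a0 : ¬ s.toList < ['0', '2', '0', '0'] := not_lt.mpr h0
              have a1 : ¬ s.toList < ['0', '5', '0', '0'] := not_lt.mpr h1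
              have a2 : ¬ s.toList < ['0', '8', '0', '0'] := not_lt.mpr h2
              have a3 : ¬ s.toList < ['1', '1', '0', '0'] := not_lt.mpr h3
              have a4 : ¬ s.toList < ['1', '4', '0', '0'] := not_lt.mpr h4
              have b5 : s.toList < ['1', '7', '0', '0'] := not_le.mp h5
              have n6 : ¬ ['2', '0', '0', '0'] ≤ s.toList := fun hx => h5 (le_trans (by decide) hx)
              have b6 : s.toList < ['2', '0', '0', '0'] := lt_trans b5 (by decide)
              have n7 : ¬ ['2', '3', '0', '0'] ≤ s.toList := fun hx => h5 (le_trans (by decide) hx)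
              have b7 : s.toList < ['2', '3', '0', '0'] := lt_trans b5 (by decide)
              simp [nearest_base_time, nearest_base_time_alt, List.foldl, bl8, bl7, bl6, bl_id, gd4, gd5, gd6, a0, a1, a2, a3, h4, a4, h5, b5, n6]
          · have a0 : ¬ s.toList < ['0', '2', '0', '0'] := not_lt.mpr h0
            have a1 : ¬ s.toList < ['0', '5', '0', '0'] := not_lt.mpr h1
            have a2 : ¬ s.toList < ['0', '8', '0', '0'] := not_lt.mpr h2
            have a3 : ¬ s.toList < ['1', '1', '0', '0'] := not_lt.mpr h3
            have b4 : s.toList < ['1', '4', '0', '0'] := not_le.mp h4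
            have n5 : ¬ ['1', '7', '0', '0'] ≤ s.toList := fun hx => h4 (le_trans (by decide) hx)
            have b5 : s.toList < ['1', '7', '0', '0'] := lt_trans b4 (by decide)
            have n6 : ¬ ['2', '0', '0', '0'] ≤ s.toList := fun hx => h4 (le_trans (by decide) hx)
            have b6 : s.toList < ['2', '0', '0', '0'] := lt_trans b4 (by decide)
            have n7 : ¬ ['2', '3', '0', '0'] ≤ s.toList := fun hx => h4 (le_trans (by decide) hx)
            have b7 : s.toList < ['2', '3', '0', '0'] := lt_trans b4 (by decide)
            simp [nearest_base_time, nearest_base_time_alt, List.foldl, bl8, bl7, bl6, bl_id, gd2, gd3, gd4, a0, a1, h2, a2, h3, a3, h4, b4]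
        · have a0 : ¬ s.toList < ['0', '2', '0', '0'] := not_lt.mpr h0
          have a1 : ¬ s.toList < ['0', '5', '0', '0'] := not_lt.mpr h1
          have a2 : ¬ s.toList < ['0', '8', '0', '0'] := not_lt.mpr h2
          have b3 : s.toList < ['1', '1', '0', '0'] := not_le.mp h3
          have n4 : ¬ ['1', '4', '0', '0'] ≤ s.toList := fun hx => h3 (le_trans (by decide) hx)
          have b4 : s.toList < ['1', '4', '0', '0'] := lt_trans b3 (by decide)
          have n5 : ¬ ['1', '7', '0', '0'] ≤ s.toList := fun hx => h3 (le_trans (by decide) hx)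
          have b5 : s.toList < ['1', '7', '0', '0'] := lt_trans b3 (by decide)
          have n6 : ¬ ['2', '0', '0', '0'] ≤ s.toList := fun hx => h3 (le_trans (by decide) hx)
          have b6 : s.toList < ['2', '0', '0', '0'] := lt_trans b3 (by decide)
          have n7 : ¬ ['2', '3', '0', '0'] ≤ s.toList := fun hx => h3 (le_trans (by decide) hx)
          have b7 : s.toList < ['2', '3', '0', '0'] := lt_trans b3 (by decide)
          simp [nearest_base_time, nearest_base_time_alt, List.foldl, bl8, bl7, bl6, bl_id, gd2, gd3, gd4, a0, a1, h2, a2, h3, b3, n4]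
      · have a0 : ¬ s.toList < ['0', '2', '0', '0'] := not_lt.mpr h0
        have a1 : ¬ s.toList < ['0', '5', '0', '0'] := not_lt.mpr h1
        have b2 : s.toList < ['0', '8', '0', '0'] := not_le.mp h2
        have n3 : ¬ ['1', '1', '0', '0'] ≤ s.toList := fun hx => h2 (le_trans (by decide) hx)
        have b3 : s.toList < ['1', '1', '0', '0'] := lt_trans b2 (by decide)
        have n4 : ¬ ['1', '4', '0', '0'] ≤ s.toList := fun hx => h2 (le_trans (by decide) hx)
        have b4 : s.toList < ['1', '4', '0', '0'] := lt_trans b2 (by decide)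
        have n5 : ¬ ['1', '7', '0', '0'] ≤ s.toList := fun hx => h2 (le_trans (by decide) hx)
        have b5 : s.toList < ['1', '7', '0', '0'] := lt_trans b2 (by decide)
        have n6 : ¬ ['2', '0', '0', '0'] ≤ s.toList := fun hx => h2 (le_trans (by decide) hx)
        have b6 : s.toList < ['2', '0', '0', '0'] := lt_trans b2 (by decide)
        have n7 : ¬ ['2', '3', '0', '0'] ≤ s.toList := fun hx => h2 (le_trans (by decide) hx)
        have b7 : s.toList < ['2', '3', '0', '0'] := lt_trans b2 (by decide)
        simp [nearest_base_time, nearest_base_time_alt, List.foldl, bl8, bl7, bl6, bl_id, gd1, gd2, gd4, a0, h1, a1, h2, b2, n4]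
    · have a0 : ¬ s.toList < ['0', '2', '0', '0'] := not_lt.mpr h0
      have b1 : s.toList < ['0', '5', '0', '0'] := not_le.mp h1
      have n2 : ¬ ['0', '8', '0', '0'] ≤ s.toList := fun hx => h1 (le_trans (by decide) hx)
      have b2 : s.toList < ['0', '8', '0', '0'] := lt_trans b1 (by decide)
      have n3 : ¬ ['1', '1', '0', '0'] ≤ s.toList := fun hx => h1 (le_trans (by decide) hx)
      have b3 : s.toList < ['1', '1', '0', '0'] := lt_trans b1 (by decide)
      have n4 : ¬ ['1', '4', '0', '0'] ≤ s.toList := fun hx => h1 (le_trans (by decide) hx)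
      have b4 : s.toList < ['1', '4', '0', '0'] := lt_trans b1 (by decide)
      have n5 : ¬ ['1', '7', '0', '0'] ≤ s.toList := fun hx => h1 (le_trans (by decide) hx)
      have b5 : s.toList < ['1', '7', '0', '0'] := lt_trans b1 (by decide)
      have n6 : ¬ ['2', '0', '0', '0'] ≤ s.toList := fun hx => h1 (le_trans (by decide) hx)
      have b6 : s.toList < ['2', '0', '0', '0'] := lt_trans b1 (by decide)
      have n7 : ¬ ['2', '3', '0', '0'] ≤ s.toList := fun hx => h1 (le_trans (by decide) hx)
      have b7 : s.toList < ['2', '3', '0', '0'] := lt_trans b1 (by decide)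
      simp [nearest_base_time, nearest_base_time_alt, List.foldl, bl8, bl7, bl6, bl5, bl_id, gd1, gd2, gd4, h0, a0, h1, b1, n2, n4]
  · have b0 : s.toList < ['0', '2', '0', '0'] := not_le.mp h0
    have n1 : ¬ ['0', '5', '0', '0'] ≤ s.toList := fun hx => h0 (le_trans (by decide) hx)
    have b1 : s.toList < ['0', '5', '0', '0'] := lt_trans b0 (by decide)
    have n2 : ¬ ['0', '8', '0', '0'] ≤ s.toList := fun hx => h0 (le_trans (by decide) hx)
    have b2 : s.toList < ['0', '8', '0', '0'] := lt_trans b0 (by decide)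
    have n3 : ¬ ['1', '1', '0', '0'] ≤ s.toList := fun hx => h0 (le_trans (by decide) hx)
    have b3 : s.toList < ['1', '1', '0', '0'] := lt_trans b0 (by decide)
    have n4 : ¬ ['1', '4', '0', '0'] ≤ s.toList := fun hx => h0 (le_trans (by decide) hx)
    have b4 : s.toList < ['1', '4', '0', '0'] := lt_trans b0 (by decide)
    have n5 : ¬ ['1', '7', '0', '0'] ≤ s.toList := fun hx => h0 (le_trans (by decide) hx)
    have b5 : s.toList < ['1', '7', '0', '0'] := lt_trans b0 (by decide)
    have n6 : ¬ ['2', '0', '0', '0'] ≤ s.toList := fun hx => h0 (le_trans (by decide) hx)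
    have b6 : s.toList < ['2', '0', '0', '0'] := lt_trans b0 (by decide)
    have n7 : ¬ ['2', '3', '0', '0'] ≤ s.toList := fun hx => h0 (le_trans (by decide) hx)
    have b7 : s.toList < ['2', '3', '0', '0'] := lt_trans b0 (by decide)
    simp [nearest_base_time, nearest_base_time_alt, List.foldl, bl8, bl7, bl6, bl5, bl_id, gd1, gd2, gd4, gq_neg, h0, b0, n1, n2, n4]

-- ===== VERDICT (by name: the statement is the Claim_ definition above) =====
theorem nearest_base_time_spec : Claim_equal_nearest_base_time := by
  intro s _
  unfold Spec_nearest_base_time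
  exact nbt_eq s
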